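-- pv_equiv track=rewrite | github.com/daisy21107/ibm-weather-art | src/BERT.py | align_word_level_tags
-- ===== SOURCE A (Python) =====
-- def align_word_level_tags(word_ids, tag_ids, id2tag, allowed_tags):
--     word_to_tags = {}
--     for idx, word_idx in enumerate(word_ids):
--         if word_idx is None:
--             continue
--         tag = id2tag.get(tag_ids[idx], "O")
--         if tag not in allowed_tags and tag != "O":
--             tag = "O"
--         word_to_tags.setdefault(word_idx, []).append(tag)
--
--     pred_tags = []
--     for tags in word_to_tags.values():
--         tag = next((t for t in tags if t.startswith('B-')),
--                    next((t for t in tags if t.startswith('I-')), "O"))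
--         pred_tags.append(tag)
--     return pred_tags
-- ===== SOURCE B (Python) =====
-- def align_word_level_tags(word_ids, tag_ids, id2tag, allowed_tags):
--     # Single fused pass: keep the running best tag per word instead of
--     # collecting all subword tags and selecting afterwards.
--     chosen = {}
--     for idx, word_idx in enumerate(word_ids):
--         if word_idx is None:
--             continue
--         tag = id2tag.get(tag_ids[idx], "O")
--         if tag not in allowed_tags and tag != "O":
--             tag = "O"
--         cur = chosen.get(word_idx, "O")
--         if tag.startswith("B-"):
--             if not cur.startswith("B-"):
--                 cur = tag
--         elif tag.startswith("I-") and cur == "O":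
--             cur = tag
--         chosen[word_idx] = cur
--     return list(chosen.values())
-- ===== Notes on version B (the rewrite author's own statement) =====
-- stated objective: simpler
-- what changed: B fuses A's two phases (group all subword tags per word in lists, then a second pass selecting first B- / first I- / 'O') into a single pass that keeps one running best tag per word in a dict and returns its values.
import Mathlib
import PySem

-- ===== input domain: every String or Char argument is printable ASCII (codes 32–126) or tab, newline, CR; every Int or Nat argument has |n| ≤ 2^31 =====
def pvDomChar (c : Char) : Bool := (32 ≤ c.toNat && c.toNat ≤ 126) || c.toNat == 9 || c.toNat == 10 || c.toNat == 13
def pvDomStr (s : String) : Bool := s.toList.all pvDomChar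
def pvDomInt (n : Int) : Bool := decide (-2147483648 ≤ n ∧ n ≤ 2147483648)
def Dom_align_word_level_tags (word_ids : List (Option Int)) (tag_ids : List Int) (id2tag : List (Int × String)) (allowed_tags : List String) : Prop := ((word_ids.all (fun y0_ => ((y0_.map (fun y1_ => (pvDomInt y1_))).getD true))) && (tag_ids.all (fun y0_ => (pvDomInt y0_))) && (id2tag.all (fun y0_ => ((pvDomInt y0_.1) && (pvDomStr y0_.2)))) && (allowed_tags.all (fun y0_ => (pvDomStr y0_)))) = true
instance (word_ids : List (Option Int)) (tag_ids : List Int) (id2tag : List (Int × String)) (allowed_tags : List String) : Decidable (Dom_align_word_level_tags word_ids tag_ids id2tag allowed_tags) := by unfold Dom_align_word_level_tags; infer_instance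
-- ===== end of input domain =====

-- B fuses A's two passes (collect all subword tags per word, then select) into one
-- pass keeping a running best tag per word; objective: simpler, same asymptotic cost.

-- ===== PORT A =====
-- shared by both ports: both Pythons compute the filtered tag for position idx
-- by the same two lines (id2tag.get(tag_ids[idx], "O"), downgrade to "O" if not allowed).
-- id2tag is a Python dict parameter: assoc-list, lookup = first match.
-- tag_ids[idx] via pyGet? (none = IndexError, excluded by Pre_); default 0 never read inside Pre_.
def pvTag (tag_ids : List Int) (id2tag : List (Int × String)) (allowed_tags : List String) (idx : Int) : String :=
  let key := (PySem.List.pyGet? tag_ids idx).getD 0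
  let tag := ((id2tag.find? (fun p => p.1 == key)).map (·.2)).getD "O"
  if tag ∉ allowed_tags ∧ tag ≠ "O" then "O" else tag

-- A's selection: first tag starting with "B-", else first starting with "I-", else "O"
def pvSelect (ts : List String) : String :=
  match ts.find? (fun t => PySem.Str.startswith t "B-") with
  | some t => t
  | none => (ts.find? (fun t => PySem.Str.startswith t "I-")).getD "O"

def align_word_level_tags (word_ids : List (Option Int)) (tag_ids : List Int) (id2tag : List (Int × String)) (allowed_tags : List String) : List String :=
  let word_to_tags : PySem.Dict Int (List String) :=
    (PySem.List.enumerate word_ids 0).foldl (fun d p =>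
      match p.2 with
      | none => d
      | some w => d.modify w [] (· ++ [pvTag tag_ids id2tag allowed_tags p.1])) PySem.Dict.empty
  word_to_tags.values.foldl (fun acc ts => acc ++ [pvSelect ts]) []

-- ===== PORT B =====
-- B's update of the running best tag by the next filtered tag
def pvStep (cur tag : String) : String :=
  if PySem.Str.startswith tag "B-" then
    if ¬ PySem.Str.startswith cur "B-" then tag else cur
  else if PySem.Str.startswith tag "I-" ∧ cur = "O" then tag else cur

def align_word_level_tags_alt (word_ids : List (Option Int)) (tag_ids : List Int) (id2tag : List (Int × String)) (allowed_tags : List String) : List String :=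
  let chosen : PySem.Dict Int String :=
    (PySem.List.enumerate word_ids 0).foldl (fun d p =>
      match p.2 with
      | none => d
      | some w => d.insert w (pvStep (d.getD w "O") (pvTag tag_ids id2tag allowed_tags p.1))) PySem.Dict.empty
  chosen.values

-- ===== PRECONDITION & SPEC =====
-- Pre_ excludes exactly the inputs where Python A raises IndexError: a non-None
-- word id at a position beyond the end of tag_ids.
def Pre_align_word_level_tags (word_ids : List (Option Int)) (tag_ids : List Int) (id2tag : List (Int × String)) (allowed_tags : List String) : Prop :=
  ∀ i : Nat, (h : i < word_ids.length) → word_ids[i] ≠ none → i < tag_ids.length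
instance (word_ids : List (Option Int)) (tag_ids : List Int) (id2tag : List (Int × String)) (allowed_tags : List String) : Decidable (Pre_align_word_level_tags word_ids tag_ids id2tag allowed_tags) := by unfold Pre_align_word_level_tags; infer_instance

def pvWitness_align_word_level_tags : List (Option Int) × List Int × (List (Int × String)) × List String :=
  ([some 0, none, some 0, some 1], [1, 2, 1, 2], [(1, "B-LOC"), (2, "I-LOC")], ["B-LOC", "I-LOC"])

def Spec_align_word_level_tags (word_ids : List (Option Int)) (tag_ids : List Int) (id2tag : List (Int × String)) (allowed_tags : List String) (out : List String) : Prop := out = align_word_level_tags_alt word_ids tag_ids id2tag allowed_tags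
instance (word_ids : List (Option Int)) (tag_ids : List Int) (id2tag : List (Int × String)) (allowed_tags : List String) (out : List String) : Decidable (Spec_align_word_level_tags word_ids tag_ids id2tag allowed_tags out) := by unfold Spec_align_word_level_tags; infer_instance

-- ===== CLAIM (what is proved, stated in full; the proofs are below) =====
def Claim_equal_align_word_level_tags : Prop := ∀ (word_ids : List (Option Int)) (tag_ids : List Int) (id2tag : List (Int × String)) (allowed_tags : List String), Dom_align_word_level_tags word_ids tag_ids id2tag allowed_tags → Pre_align_word_level_tags word_ids tag_ids id2tag allowed_tags → Spec_align_word_level_tags word_ids tag_ids id2tag allowed_tags (align_word_level_tags word_ids tag_ids id2tag allowed_tags)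

-- ===== LEMMAS AND PROOFS =====

lemma pvSelect_nil : pvSelect [] = "O" := rfl

lemma startswith_B_ne_O {t : String} (h : PySem.Str.startswith t "B-" = true) : t ≠ "O" := by
  rintro rfl; revert h; decide

lemma startswith_I_ne_O {t : String} (h : PySem.Str.startswith t "I-" = true) : t ≠ "O" := by
  rintro rfl; revert h; decide

lemma pvSelect_of_findB {ts : List String} {b : String}
    (hb : ts.find? (fun t => PySem.Str.startswith t "B-") = some b) : pvSelect ts = b := by
  unfold pvSelect; rw [hb]

lemma pvSelect_of_findI {ts : List String} {i : String}
    (hb : ts.find? (fun t => PySem.Str.startswith t "B-") = none)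
    (hi : ts.find? (fun t => PySem.Str.startswith t "I-") = some i) : pvSelect ts = i := by
  unfold pvSelect; rw [hb, hi]; rfl

lemma pvSelect_of_none {ts : List String}
    (hb : ts.find? (fun t => PySem.Str.startswith t "B-") = none)
    (hi : ts.find? (fun t => PySem.Str.startswith t "I-") = none) : pvSelect ts = "O" := by
  unfold pvSelect; rw [hb, hi]; rfl

lemma pvSelect_append (ts : List String) (t : String) :
    pvSelect (ts ++ [t]) = pvStep (pvSelect ts) t := by
  cases hb : ts.find? (fun t => PySem.Str.startswith t "B-") with
  | some b =>
    have hbs : PySem.Str.startswith b "B-" = true := by simpa using List.find?_some hb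
    rw [pvSelect_of_findB (by rw [List.find?_append, hb]; rfl), pvSelect_of_findB hb]
    unfold pvStep
    by_cases h1 : PySem.Str.startswith t "B-" = true
    · rw [if_pos h1, if_neg (not_not_intro hbs)]
    · rw [if_neg h1, if_neg (fun h => absurd h.2 (startswith_B_ne_O hbs))]
  | none =>
    by_cases htb : PySem.Str.startswith t "B-" = true
    · have hLB : (ts ++ [t]).find? (fun t => PySem.Str.startswith t "B-") = some t := by
        rw [List.find?_append, hb, Option.none_or, List.find?_cons_of_pos (by simpa using htb),
          ]
      rw [pvSelect_of_findB hLB]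
      cases hi : ts.find? (fun t => PySem.Str.startswith t "I-") with
      | some i =>
        have his : PySem.Str.startswith i "I-" = true := by simpa using List.find?_some hi
        have hib : ¬ PySem.Str.startswith i "B-" = true := fun hx =>
          (List.find?_eq_none.mp hb i (List.mem_of_find?_eq_some hi)) (by simpa using hx)
        rw [pvSelect_of_findI hb hi]
        unfold pvStep
        rw [if_pos htb, if_pos hib]
      | none =>
        rw [pvSelect_of_none hb hi]
        unfold pvStep
        rw [if_pos htb, if_pos (by decide)]
    · have hLB : (ts ++ [t]).find? (fun t => PySem.Str.startswith t "B-") = none := by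
        rw [List.find?_append, hb, Option.none_or, List.find?_cons_of_neg (by simpa using htb),
          List.find?_nil]
      cases hi : ts.find? (fun t => PySem.Str.startswith t "I-") with
      | some i =>
        have his : PySem.Str.startswith i "I-" = true := by simpa using List.find?_some hi
        rw [pvSelect_of_findI hLB (by rw [List.find?_append, hi]; rfl), pvSelect_of_findI hb hi]
        unfold pvStep
        rw [if_neg htb, if_neg (fun h => startswith_I_ne_O his h.2)]
      | none =>
        rw [pvSelect_of_none hb hi]
        by_cases hti : PySem.Str.startswith t "I-" = true
        · rw [pvSelect_of_findI hLB (by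
            rw [List.find?_append, hi, Option.none_or, List.find?_cons_of_pos (by simpa using hti)])]
          unfold pvStep
          rw [if_neg htb, if_pos ⟨hti, rfl⟩]
        · rw [pvSelect_of_none hLB (by
            rw [List.find?_append, hi, Option.none_or, List.find?_cons_of_neg (by simpa using hti),
              List.find?_nil])]
          unfold pvStep
          rw [if_neg htb, if_neg (fun h => hti h.1)]

lemma modify_append_eq_insert (d : PySem.Dict Int (List String)) (w : Int) (t : String) :
    d.modify w [] (· ++ [t]) = d.insert w (d.getD w [] ++ [t]) := rfl

-- loop invariant: the two folds keep equal, duplicate-free key lists, and B's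
-- running tag at each key is pvSelect of A's collected tag list there
lemma pv_loop_inv (tag_ids : List Int) (id2tag : List (Int × String)) (allowed_tags : List String)
    (es : List (Int × Option Int)) (dA : PySem.Dict Int (List String)) (dB : PySem.Dict Int String)
    (hk : dA.keys = dB.keys) (hnd : dA.keys.Nodup)
    (hv : ∀ k, dB.getD k "O" = pvSelect (dA.getD k [])) :
    (es.foldl (fun d p =>
      match p.2 with
      | none => d
      | some w => d.modify w [] (· ++ [pvTag tag_ids id2tag allowed_tags p.1])) dA).keys
      = (es.foldl (fun d p =>
      match p.2 with
      | none => d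
      | some w => d.insert w (pvStep (d.getD w "O") (pvTag tag_ids id2tag allowed_tags p.1))) dB).keys
    ∧ (es.foldl (fun d p =>
      match p.2 with
      | none => d
      | some w => d.modify w [] (· ++ [pvTag tag_ids id2tag allowed_tags p.1])) dA).keys.Nodup
    ∧ ∀ k, (es.foldl (fun d p =>
      match p.2 with
      | none => d
      | some w => d.insert w (pvStep (d.getD w "O") (pvTag tag_ids id2tag allowed_tags p.1))) dB).getD k "O"
        = pvSelect ((es.foldl (fun d p =>
      match p.2 with
      | none => d
      | some w => d.modify w [] (· ++ [pvTag tag_ids id2tag allowed_tags p.1])) dA).getD k []) := by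
  induction es generalizing dA dB with
  | nil => exact ⟨hk, hnd, hv⟩
  | cons p rest ih =>
    cases hw : p.2 with
    | none => simp only [List.foldl_cons, hw]; exact ih dA dB hk hnd hv
    | some w =>
      simp only [List.foldl_cons, hw]
      rw [modify_append_eq_insert]
      have hc : dB.contains w = dA.contains w := by
        simp [PySem.Dict.contains_eq_decide_mem_keys, hk]
      apply ih
      · -- keys stay equal
        by_cases hcw : dA.contains w = true
        · rw [PySem.Dict.keys_insert_of_contains dA _ hcw,
            PySem.Dict.keys_insert_of_contains dB _ (hc.trans hcw), hk]
        · rw [PySem.Dict.keys_insert_of_not_contains dA _ (Bool.eq_false_iff.mpr hcw),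
            PySem.Dict.keys_insert_of_not_contains dB _
              (hc.trans (Bool.eq_false_iff.mpr hcw)), hk]
      · -- keys stay duplicate-free
        by_cases hcw : dA.contains w = true
        · rw [PySem.Dict.keys_insert_of_contains dA _ hcw]; exact hnd
        · rw [PySem.Dict.keys_insert_of_not_contains dA _ (Bool.eq_false_iff.mpr hcw)]
          refine List.Nodup.append hnd (List.nodup_singleton w) ?_
          intro a ha hb
          rw [List.mem_singleton] at hb; subst hb
          exact hcw ((PySem.Dict.contains_iff_mem_keys dA a).mpr ha)
      · -- B's running tag = pvSelect of A's tag list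
        intro k
        by_cases hkw : k = w
        · subst hkw
          rw [PySem.Dict.getD_insert_self, PySem.Dict.getD_insert_self, pvSelect_append, hv k]
        · rw [PySem.Dict.getD_insert_of_ne dB _ _ hkw, PySem.Dict.getD_insert_of_ne dA _ _ hkw,
            hv k]

-- ===== VERDICT (by name: the statement is the Claim_ definition above) =====
theorem align_word_level_tags_spec : Claim_equal_align_word_level_tags := by
  intro word_ids tag_ids id2tag allowed_tags _ _
  unfold Spec_align_word_level_tags align_word_level_tags align_word_level_tags_alt
  obtain ⟨hk, hnd, hv⟩ := pv_loop_inv tag_ids id2tag allowed_tags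
    (PySem.List.enumerate word_ids 0) PySem.Dict.empty PySem.Dict.empty
    (by simp [PySem.Dict.keys_empty]) (by simp [PySem.Dict.keys_empty])
    (by intro k; simp [PySem.Dict.getD_empty, pvSelect_nil])
  rw [PySem.List.foldl_append_singleton_eq_map, List.nil_append,
    PySem.Dict.values_eq_map_keys _ hnd [], PySem.Dict.values_eq_map_keys _ (hk ▸ hnd) "O",
    ← hk, List.map_map]
  exact List.map_congr_left (fun k _ => (hv k).symm)
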